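-- pv_equiv track=rewrite | github.com/megamen32/tg-planner | etl/extract/wb_client_async.py | _guess_basket_hosts
-- ===== SOURCE A (Python) =====
-- from bisect import bisect_left
--
-- MAX_BASKET_HOST = 32
--
-- _BASKET_VOL_THRESHOLDS: tuple[int, ...] = (
--     143, 287, 431, 719, 1007, 1061, 1115, 1169,
--     1313, 1601, 1655, 1919, 2045, 2189, 2405, 2621,
--     2837, 3053, 3269, 3485, 3701, 3917, 4133, 4349,
--     4565, 4877, 5189, 5501, 5813, 6125, 6437,
-- )
--
-- def _guess_basket_hosts(vol: int) -> list[int]: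
--     if vol < 0:
--         return [9, 1, 2]
--
--     index = bisect_left(_BASKET_VOL_THRESHOLDS, vol)
--     primary_host = min(index + 1, MAX_BASKET_HOST)
--
--     candidates = [primary_host]
--     seen = {primary_host}
--
--     base = max(1, (vol + 159) // 160)
--     for candidate in (base, base - 1, base + 1, base - 2, base + 2):
--         if 1 <= candidate <= MAX_BASKET_HOST and candidate not in seen:
--             seen.add(candidate)
--             candidates.append(candidate)
--     return candidates
-- ===== SOURCE B (Python) =====
-- MAX_BASKET_HOST = 32
--
-- _BASKET_VOL_THRESHOLDS: tuple[int, ...] = (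
--     143, 287, 431, 719, 1007, 1061, 1115, 1169,
--     1313, 1601, 1655, 1919, 2045, 2189, 2405, 2621,
--     2837, 3053, 3269, 3485, 3701, 3917, 4133, 4349,
--     4565, 4877, 5189, 5501, 5813, 6125, 6437,
-- )
--
-- def _guess_basket_hosts(vol: int) -> list[int]:
--     if vol < 0:
--         return [9, 1, 2]
--
--     # early-exit linear scan instead of binary search
--     index = 0
--     for t in _BASKET_VOL_THRESHOLDS:
--         if t >= vol:
--             break
--         index += 1
--     primary_host = min(index + 1, MAX_BASKET_HOST)
--
--     # the result list doubles as the dedup structure: no auxiliary set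
--     candidates = [primary_host]
--     base = max(1, (vol + 159) // 160)
--     for candidate in (base, base - 1, base + 1, base - 2, base + 2):
--         if 1 <= candidate <= MAX_BASKET_HOST and candidate not in candidates:
--             candidates.append(candidate)
--     return candidates
-- ===== Notes on version B (the rewrite author's own statement) =====
-- stated objective: simpler
-- what changed: Replaces bisect_left's binary search with an explicit early-exit linear scan over the fixed threshold tuple, and drops the auxiliary 'seen' set by deduplicating candidates against the result list itself.
import Mathlib
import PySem

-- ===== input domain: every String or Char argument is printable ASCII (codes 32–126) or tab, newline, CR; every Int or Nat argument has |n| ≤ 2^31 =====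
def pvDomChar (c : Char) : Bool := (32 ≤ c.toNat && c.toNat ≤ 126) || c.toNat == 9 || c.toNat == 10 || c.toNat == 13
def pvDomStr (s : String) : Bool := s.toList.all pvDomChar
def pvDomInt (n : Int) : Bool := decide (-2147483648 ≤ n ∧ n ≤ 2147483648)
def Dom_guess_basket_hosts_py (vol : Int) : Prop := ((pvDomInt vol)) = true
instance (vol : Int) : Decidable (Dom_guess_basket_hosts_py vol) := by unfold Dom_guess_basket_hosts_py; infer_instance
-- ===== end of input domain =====

-- B replaces A's library binary search by an explicit early-exit linear scan and
-- drops the auxiliary 'seen' set, deduplicating against the result list itself (objective: simpler).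

-- ===== PORT A =====
def pvThresholds : List Int :=
  [143, 287, 431, 719, 1007, 1061, 1115, 1169,
   1313, 1601, 1655, 1919, 2045, 2189, 2405, 2621,
   2837, 3053, 3269, 3485, 3701, 3917, 4133, 4349,
   4565, 4877, 5189, 5501, 5813, 6125, 6437]

-- literal port of bisect.bisect_left's lo/hi loop (fuel bounds the while-loop; 40 ≥ any possible iteration count here)
def pvBisectLeft (xs : List Int) (x : Int) (lo hi : Int) : Nat → Int
  | 0 => lo
  | f + 1 =>
    if lo < hi then
      let mid := PySem.Int.floordiv (lo + hi) 2
      if (PySem.List.pyGet? xs mid).getD 0 < x then pvBisectLeft xs x (mid + 1) hi f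
      else pvBisectLeft xs x lo mid f
    else lo

def guess_basket_hosts_py (vol : Int) : List Int :=
  if vol < 0 then [9, 1, 2]
  else
    let index := pvBisectLeft pvThresholds vol 0 31 40
    let primary_host := min (index + 1) 32
    let base := max 1 (PySem.Int.floordiv (vol + 159) 160)
    let st := [base, base - 1, base + 1, base - 2, base + 2].foldl
      (fun (st : List Int × PySem.Set Int) c =>
        if 1 ≤ c ∧ c ≤ 32 ∧ PySem.Set.contains st.2 c = false then
          (st.1 ++ [c], PySem.Set.add st.2 c)
        else st)
      ([primary_host], PySem.Set.add PySem.Set.empty primary_host)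
    st.1

-- ===== PORT B =====
-- early-exit linear scan: number of leading thresholds strictly below vol
def pvScanIndex (vol : Int) : List Int → Int
  | [] => 0
  | t :: ts => if vol ≤ t then 0 else pvScanIndex vol ts + 1

def guess_basket_hosts_py_alt (vol : Int) : List Int :=
  if vol < 0 then [9, 1, 2]
  else
    let primary_host := min (pvScanIndex vol pvThresholds + 1) 32
    let base := max 1 (PySem.Int.floordiv (vol + 159) 160)
    [base, base - 1, base + 1, base - 2, base + 2].foldl
      (fun cands c =>
        if 1 ≤ c ∧ c ≤ 32 ∧ cands.contains c = false then cands ++ [c] else cands)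
      [primary_host]

-- ===== PRECONDITION & SPEC =====
def Spec_guess_basket_hosts_py (vol : Int) (out : List Int) : Prop := out = guess_basket_hosts_py_alt vol
instance (vol : Int) (out : List Int) : Decidable (Spec_guess_basket_hosts_py vol out) := by unfold Spec_guess_basket_hosts_py; infer_instance

-- ===== CLAIM (what is proved, stated in full; the proofs are below) =====
def Claim_equal_guess_basket_hosts_py : Prop := ∀ (vol : Int), Dom_guess_basket_hosts_py vol → Spec_guess_basket_hosts_py vol (guess_basket_hosts_py vol)

-- ===== LEMMAS AND PROOFS =====
lemma mono_of_pairwise (xs : List Int) (h : xs.Pairwise (· ≤ ·)) :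
    ∀ i j : Nat, i ≤ j → j < xs.length → xs.getD i 0 ≤ xs.getD j 0 := by
  intro i j hij hj
  rcases Nat.lt_or_ge i j with hlt | hge
  · rw [List.getD_eq_getElem xs 0 (by omega), List.getD_eq_getElem xs 0 hj]
    exact List.pairwise_iff_getElem.mp h i j (by omega) hj hlt
  · have : i = j := by omega
    subst this; rfl

lemma bisect_spec (xs : List Int) (x : Int)
    (hmono : ∀ i j : Nat, i ≤ j → j < xs.length → xs.getD i 0 ≤ xs.getD j 0) :
    ∀ (fuel : Nat) (lo hi : Int), 0 ≤ lo → lo ≤ hi → hi ≤ xs.length →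
    (hi - lo).toNat ≤ fuel →
    (∀ i : Nat, (i : Int) < lo → xs.getD i 0 < x) →
    (∀ i : Nat, hi ≤ (i : Int) → i < xs.length → x ≤ xs.getD i 0) →
    0 ≤ pvBisectLeft xs x lo hi fuel ∧ pvBisectLeft xs x lo hi fuel ≤ xs.length ∧
      (∀ i : Nat, (i : Int) < pvBisectLeft xs x lo hi fuel → xs.getD i 0 < x) ∧
      (∀ i : Nat, pvBisectLeft xs x lo hi fuel ≤ (i : Int) → i < xs.length → x ≤ xs.getD i 0) := by
  intro fuel
  induction fuel with
  | zero =>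
    intro lo hi h0 hlh hhl hfuel hpre hsuf
    have : lo = hi := by omega
    subst this
    have hres : pvBisectLeft xs x lo lo 0 = lo := rfl
    rw [hres]
    exact ⟨h0, hhl, hpre, hsuf⟩
  | succ f ih =>
    intro lo hi h0 hlh hhl hfuel hpre hsuf
    by_cases hlt : lo < hi
    · have hmidb := PySem.Int.floordiv_two_mid_bounds hlh
      simp only [pvBisectLeft, if_pos hlt]
      set mid := PySem.Int.floordiv (lo + hi) 2 with hmid
      have hmidlt : mid < hi := by
        rw [hmid, PySem.Int.floordiv_lt_iff_lt_mul (by omega)]; omega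
      have hmid0 : 0 ≤ mid := by omega
      have hmidlen : mid < (xs.length : Int) := by omega
      have hget : (PySem.List.pyGet? xs mid).getD 0 = xs.getD mid.toNat 0 := by
        rw [PySem.List.pyGet?_eq_some_getElem xs hmid0 hmidlen]
        simp [List.getD_eq_getElem?_getD, List.getElem?_eq_getElem (show mid.toNat < xs.length by omega)]
      rw [hget]
      by_cases hc : xs.getD mid.toNat 0 < x
      · rw [if_pos hc]
        refine ih (mid + 1) hi (by omega) (by omega) hhl (by omega) ?_ hsuf
        intro i hi2
        exact lt_of_le_of_lt (hmono i mid.toNat (by omega) (by omega)) hc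
      · rw [if_neg hc]
        rw [Int.not_lt] at hc
        refine ih lo mid h0 (by omega) (by omega) (by omega) hpre ?_
        intro i hi2 hilen
        exact le_trans hc (hmono mid.toNat i (by omega) hilen)
    · simp only [pvBisectLeft, if_neg hlt]
      have : lo = hi := by omega
      subst this
      exact ⟨h0, by omega, hpre, hsuf⟩

lemma scan_spec (x : Int) : ∀ (xs : List Int),
    (∀ i j : Nat, i ≤ j → j < xs.length → xs.getD i 0 ≤ xs.getD j 0) →
    0 ≤ pvScanIndex x xs ∧ pvScanIndex x xs ≤ xs.length ∧
      (∀ i : Nat, (i : Int) < pvScanIndex x xs → xs.getD i 0 < x) ∧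
      (∀ i : Nat, pvScanIndex x xs ≤ (i : Int) → i < xs.length → x ≤ xs.getD i 0) := by
  intro xs
  induction xs with
  | nil => intro _; refine ⟨le_refl 0, by simp [pvScanIndex], ?_, ?_⟩ <;> simp [pvScanIndex]
  | cons t ts ihts =>
    intro hmono
    by_cases hc : x ≤ t
    · refine ⟨by simp [pvScanIndex, hc], by simp [pvScanIndex, hc]; omega, ?_, ?_⟩
      · intro i hi2; simp [pvScanIndex, hc] at hi2; omega
      · intro i _ hilen
        calc x ≤ t := hc
          _ = (t :: ts).getD 0 0 := rfl
          _ ≤ (t :: ts).getD i 0 := hmono 0 i (by omega) hilen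
    · have hmono' : ∀ i j : Nat, i ≤ j → j < ts.length → ts.getD i 0 ≤ ts.getD j 0 := by
        intro i j hij hj
        have := hmono (i + 1) (j + 1) (by omega) (by simpa using Nat.succ_lt_succ hj)
        simpa using this
      obtain ⟨h1, h2, h3, h4⟩ := ihts hmono'
      have hs : pvScanIndex x (t :: ts) = pvScanIndex x ts + 1 := by simp [pvScanIndex, hc]
      refine ⟨by omega, by simp [hs]; omega, ?_, ?_⟩
      · intro i hi2
        rw [hs] at hi2
        cases i with
        | zero => simpa using (by omega : t < x)
        | succ n =>
          have := h3 n (by push_cast at hi2 ⊢; omega)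
          simpa using this
      · intro i hi2 hilen
        rw [hs] at hi2
        cases i with
        | zero => simp at hi2; omega
        | succ n =>
          have := h4 n (by push_cast at hi2 ⊢; omega) (by simpa using hilen)
          simpa using this

lemma pvBisect_eq_scan (vol : Int) :
    pvBisectLeft pvThresholds vol 0 31 40 = pvScanIndex vol pvThresholds := by
  have hmono := mono_of_pairwise pvThresholds (by decide)
  have hlen : pvThresholds.length = 31 := by decide
  obtain ⟨a0, a1, a2, a3⟩ := bisect_spec pvThresholds vol hmono 40 0 31 le_rfl (by omega)
    (by rw [hlen]; norm_num) (by omega) (fun i h => absurd h (by omega)) (fun i h1 h2 => absurd h2 (by omega))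
  obtain ⟨b0, b1, b2, b3⟩ := scan_spec vol pvThresholds hmono
  set r1 := pvBisectLeft pvThresholds vol 0 31 40
  set r2 := pvScanIndex vol pvThresholds
  rcases lt_trichotomy r1 r2 with h | h | h
  · exfalso
    have hi1 : (r1.toNat : Int) = r1 := Int.toNat_of_nonneg a0
    have hlt := b2 r1.toNat (by omega)
    have hge := a3 r1.toNat (by omega) (by omega)
    omega
  · exact h
  · exfalso
    have hi2 : (r2.toNat : Int) = r2 := Int.toNat_of_nonneg b0
    have hlt := a2 r2.toNat (by omega)
    have hge := b3 r2.toNat (by omega) (by omega)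
    omega

lemma pvFold_eq : ∀ (l cands : List Int) (seen : PySem.Set Int),
    (∀ x : Int, x ∈ seen ↔ x ∈ cands) →
    (l.foldl
      (fun (st : List Int × PySem.Set Int) c =>
        if 1 ≤ c ∧ c ≤ 32 ∧ PySem.Set.contains st.2 c = false then
          (st.1 ++ [c], PySem.Set.add st.2 c)
        else st)
      (cands, seen)).1
    = l.foldl
      (fun cands c =>
        if 1 ≤ c ∧ c ≤ 32 ∧ cands.contains c = false then cands ++ [c] else cands)
      cands := by
  intro l
  induction l with
  | nil => intro cands seen h; rfl
  | cons c cs ih =>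
    intro cands seen h
    simp only [List.foldl_cons]
    have hcontains : PySem.Set.contains seen c = cands.contains c := by
      simp only [PySem.Set.contains]
      rcases Bool.eq_false_or_eq_true (cands.contains c) with hb | hb <;>
      · rw [hb]
        simp only [List.contains_eq_mem, decide_eq_true_eq, decide_eq_false_iff_not] at hb ⊢
        first
          | exact fun hm => hb ((h c).mp hm)
          | exact (h c).mpr hb
    by_cases hcond : 1 ≤ c ∧ c ≤ 32 ∧ cands.contains c = false
    · rw [if_pos (by rw [hcontains]; exact hcond), if_pos hcond]
      have hadd : PySem.Set.add seen c = seen ++ [c] := by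
        simp only [PySem.Set.add, hcontains, hcond.2.2, Bool.false_eq_true, if_false]
      rw [hadd]
      exact ih (cands ++ [c]) (seen ++ [c]) (by intro x; simp [h x])
    · rw [if_neg (by rw [hcontains]; exact hcond), if_neg hcond]
      exact ih cands seen h

-- ===== VERDICT (by name: the statement is the Claim_ definition above) =====
theorem guess_basket_hosts_py_spec : Claim_equal_guess_basket_hosts_py := by
  intro vol _
  unfold Spec_guess_basket_hosts_py guess_basket_hosts_py guess_basket_hosts_py_alt
  by_cases h : vol < 0
  · simp [h]
  · simp only [h, if_false, pvBisect_eq_scan]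
    exact pvFold_eq _ _ _ (by simp [PySem.Set.add, PySem.Set.empty])
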